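-- pv_equiv track=rewrite | github.com/Noble14/aoc | 2023/day14/first.py | get_row_value
-- ===== SOURCE A (Python) =====
-- def get_row_value(row):
--     h = len(row)
--     j = h
--     sum = 0
--     for i, el in enumerate(row):
--         if el == "O":
--             sum += h
--             h -= 1
--         elif el == "#":
--             h = j - i - 1
--     return sum
-- ===== SOURCE B (Python) =====
-- def get_row_value(row):
--     # Two staged passes: split the row into '#'-separated segments, then add each
--     # segment's closed-form load c*H - c*(c-1)//2 while advancing a running offset.
--     n = len(row)
--     parts = []
--     seg = []
--     for el in row:
--         if el == "#":
--             parts.append(seg)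
--             seg = []
--         else:
--             seg.append(el)
--     parts.append(seg)
--     total = 0
--     offset = 0
--     for part in parts:
--         c = part.count("O")
--         H = n - offset
--         total += c * H - c * (c - 1) // 2
--         offset += len(part) + 1
--     return total
-- ===== Notes on version B (the rewrite author's own statement) =====
-- stated objective: alternative
-- what changed: B first splits the row into '#'-separated segments, then sums each segment's load with the Gauss closed form c*H - c*(c-1)//2 while advancing a running offset, instead of A's single pass with a per-rock decrementing height.
import Mathlib
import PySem

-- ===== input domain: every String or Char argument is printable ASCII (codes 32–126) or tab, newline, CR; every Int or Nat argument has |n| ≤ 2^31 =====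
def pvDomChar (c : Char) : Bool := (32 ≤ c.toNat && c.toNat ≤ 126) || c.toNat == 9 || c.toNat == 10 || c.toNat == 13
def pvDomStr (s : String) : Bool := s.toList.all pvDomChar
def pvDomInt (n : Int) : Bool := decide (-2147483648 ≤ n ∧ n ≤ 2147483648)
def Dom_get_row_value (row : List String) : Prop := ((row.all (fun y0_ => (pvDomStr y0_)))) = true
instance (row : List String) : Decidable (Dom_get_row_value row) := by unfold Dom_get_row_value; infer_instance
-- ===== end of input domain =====

-- B splits the row into '#'-separated segments and sums each segment's Gauss closed-form
-- load with a running offset, instead of A's per-rock decrementing-height pass; alternative, same cost.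

-- ===== PORT A =====
def get_row_value (row : List String) : Int :=
  let j : Int := row.length
  ((PySem.List.enumerate row 0).foldl (fun (st : Int × Int) (p : Int × String) =>
      if p.2 = "O" then (st.1 - 1, st.2 + st.1)
      else if p.2 = "#" then (j - p.1 - 1, st.2)
      else st) (j, 0)).2

-- ===== PORT B =====
-- Source B's first pass: split into '#'-separated segments (accumulating parts and seg)
def pvSplitHash : List (List String) → List String → List String → List (List String)
  | parts, seg, [] => parts ++ [seg]
  | parts, seg, el :: rest =>
    if el = "#" then pvSplitHash (parts ++ [seg]) [] rest
    else pvSplitHash parts (seg ++ [el]) rest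

def get_row_value_alt (row : List String) : Int :=
  let n : Int := row.length
  let parts := pvSplitHash [] [] row
  (parts.foldl (fun (st : Int × Int) (part : List String) =>
      let c : Int := (part.count "O" : Nat)
      let H : Int := n - st.2
      (st.1 + (c * H - PySem.Int.floordiv (c * (c - 1)) 2), st.2 + part.length + 1))
    (0, 0)).1

-- ===== PRECONDITION & SPEC =====
def Spec_get_row_value (row : List String) (out : Int) : Prop := out = get_row_value_alt row
instance (row : List String) (out : Int) : Decidable (Spec_get_row_value row out) := by unfold Spec_get_row_value; infer_instance

-- ===== CLAIM =====
def Claim_equal_get_row_value : Prop := ∀ (row : List String), Dom_get_row_value row → Spec_get_row_value row (get_row_value row)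

-- ===== LEMMAS AND PROOFS =====

-- common recursive specification: load of a row given current top height h
def specF : Int → List String → Int
  | _, [] => 0
  | h, el :: rest =>
    if el = "O" then h + specF (h - 1) rest
    else if el = "#" then specF (rest.length : Int) rest
    else specF h rest

-- triangular term of the Gauss closed form
def triT (c : Int) : Int := PySem.Int.floordiv (c * (c - 1)) 2

theorem triT_succ (c : Int) : triT (c + 1) = triT c + c := by
  unfold triT
  rw [PySem.Int.floordiv_eq_ediv_of_pos (by omega), PySem.Int.floordiv_eq_ediv_of_pos (by omega)]
  have h : (c + 1) * ((c + 1) - 1) = c * (c - 1) + 2 * c := by ring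
  rw [h]
  generalize c * (c - 1) = a
  omega

-- A's fold computes specF
theorem lemA (xs : List String) : ∀ (j s h sum : Int), j - s = (xs.length : Int) →
    ((PySem.List.enumerate xs s).foldl (fun (st : Int × Int) (p : Int × String) =>
      if p.2 = "O" then (st.1 - 1, st.2 + st.1)
      else if p.2 = "#" then (j - p.1 - 1, st.2)
      else st) (h, sum)).2 = sum + specF h xs := by
  induction xs with
  | nil => intro j s h sum _; simp [PySem.List.enumerate_nil, specF]
  | cons el rest ih =>
    intro j s h sum hlen
    rw [PySem.List.enumerate_cons]
    simp only [List.foldl_cons]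
    by_cases hO : el = "O"
    · simp only [hO]; simp
      rw [ih j (s + 1) (h - 1) (sum + h) (by simp at hlen ⊢; omega)]
      simp [specF]; ring
    · by_cases hH : el = "#"
      · simp only [hH]; simp
        have hj : j - s - 1 = (rest.length : Int) := by simp at hlen; omega
        rw [ih j (s + 1) (j - s - 1) sum (by omega)]
        rw [hj]; simp [specF]
      · simp only [if_neg hO, if_neg hH]
        rw [ih j (s + 1) h sum (by simp at hlen ⊢; omega)]
        simp [specF, hO, hH]

-- a hash-free segment contributes the Gauss closed form, then hands over h - c
theorem segLemma (seg : List String) : ∀ (h : Int) (ys : List String), "#" ∉ seg →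
    specF h (seg ++ ys) = (seg.count "O" : Int) * h - triT (seg.count "O") + specF (h - (seg.count "O" : Int)) ys := by
  induction seg with
  | nil => intro h ys _; simp [triT, PySem.Int.floordiv]
  | cons el rest ih =>
    intro h ys hn
    have hH : el ≠ "#" := by intro e; exact hn (by simp [e])
    have hrest : "#" ∉ rest := fun m => hn (by simp [m])
    by_cases hO : el = "O"
    · subst hO
      simp only [List.cons_append, specF]
      simp only [if_true]
      rw [ih (h - 1) ys hrest]
      have hc : (List.count "O" ("O" :: rest) : Int) = (List.count "O" rest : Int) + 1 := by
        simp
      rw [hc, triT_succ]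
      have he : h - 1 - (List.count "O" rest : Int) = h - ((List.count "O" rest : Int) + 1) := by ring
      rw [he]; ring
    · simp only [List.cons_append, specF, if_neg hO, if_neg hH]
      rw [ih h ys hrest]
      have hc : List.count "O" (el :: rest) = List.count "O" rest := by
        simp [hO]
      rw [hc]

-- the parts accumulator factors out of the split
theorem splitHash_parts (xs : List String) : ∀ (parts : List (List String)) (seg : List String),
    pvSplitHash parts seg xs = parts ++ pvSplitHash [] seg xs := by
  induction xs with
  | nil => intro parts seg; simp [pvSplitHash]
  | cons el rest ih =>
    intro parts seg
    by_cases hH : el = "#"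
    · simp only [pvSplitHash, if_pos hH, List.nil_append]
      rw [ih (parts ++ [seg]) [], ih [seg] []]
      simp
    · simp only [pvSplitHash, if_neg hH]
      exact ih parts (seg ++ [el])

-- B's second-pass fold over the split of (seg, xs) computes specF of seg ++ xs
theorem lemB (n : Int) (xs : List String) : ∀ (seg : List String) (off total : Int),
    "#" ∉ seg → off + (seg.length : Int) + (xs.length : Int) = n →
    ((pvSplitHash [] seg xs).foldl (fun (st : Int × Int) (part : List String) =>
        let c : Int := (part.count "O" : Nat)
        let H : Int := n - st.2
        (st.1 + (c * H - PySem.Int.floordiv (c * (c - 1)) 2), st.2 + part.length + 1))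
      (total, off)).1 = total + specF (n - off) (seg ++ xs) := by
  induction xs with
  | nil =>
    intro seg off total hn hlen
    simp only [pvSplitHash, List.nil_append, List.foldl_cons, List.foldl_nil]
    have hs := segLemma seg (n - off) [] hn
    rw [List.append_nil] at hs
    rw [List.append_nil, hs]
    simp [specF, triT]
  | cons el rest ih =>
    intro seg off total hn hlen
    by_cases hH : el = "#"
    · simp only [pvSplitHash, if_pos hH, List.nil_append]
      rw [splitHash_parts rest [seg] []]
      simp only [List.foldl_append, List.foldl_cons, List.foldl_nil]
      have hlen' : (off + (seg.length : Int) + 1) + (0 : Int) + (rest.length : Int) = n := by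
        simp at hlen ⊢; omega
      rw [ih [] (off + (seg.length : Int) + 1)
        (total + ((seg.count "O" : Int) * (n - off) - PySem.Int.floordiv ((seg.count "O" : Int) * ((seg.count "O" : Int) - 1)) 2))
        (by simp) (by simpa using hlen')]
      rw [segLemma seg (n - off) (el :: rest) hn]
      simp only [hH, specF, if_neg (by decide : ¬ ("#" : String) = "O"), if_true]
      have hr : (rest.length : Int) = n - (off + (seg.length : Int) + 1) := by
        simp at hlen; omega
      rw [← hr]
      simp [triT]
      ring
    · simp only [pvSplitHash, if_neg hH]
      have hn' : "#" ∉ seg ++ [el] := by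
        intro m; rcases List.mem_append.mp m with m | m
        · exact hn m
        · simp at m; exact hH m.symm
      rw [ih (seg ++ [el]) off total hn' (by simp at hlen ⊢; omega)]
      simp

-- ===== VERDICT =====
theorem get_row_value_spec : Claim_equal_get_row_value := by
  intro row _
  unfold Spec_get_row_value get_row_value get_row_value_alt
  rw [lemA row (row.length : Int) 0 (row.length : Int) 0 (by omega)]
  have hb := lemB (row.length : Int) row [] 0 0 (by simp) (by simp)
  simp only [List.nil_append] at hb
  rw [hb]
  simp
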